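-- pv_equiv track=rewrite | github.com/kangnathan/fibonacci_lucas_tribonacci | fib_luc_tri.py | find_in_lucas
-- ===== SOURCE A (Python) =====
-- def find_in_lucas(number):
--     lucas_sequence = [2, 1]
--     while lucas_sequence[-1] < number:
--         next_number = lucas_sequence[-1] + lucas_sequence[-2]
--         lucas_sequence.append(next_number)
--     if number in lucas_sequence:
--         return lucas_sequence.index(number) + 1
--     else:
--         return -1
-- ===== SOURCE B (Python) =====
-- def find_in_lucas(number):
--     # Positions 1 and 2 hold the non-monotone head 2, 1; from position 3 on the
--     # sequence is strictly increasing, so binary-search the position, computing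
--     # each Lucas value on demand by Fibonacci fast doubling (L(k) = 2F(k+1) - F(k)).
--     if number == 2:
--         return 1
--     if number == 1:
--         return 2
--     if number < 3:
--         return -1
--     hi = 2
--     while lucas(hi) < number:   # exponential search for an upper bound on the index
--         hi *= 2
--     lo = 2
--     while lo < hi:              # binary search for the least k >= 2 with L(k) >= number
--         mid = (lo + hi) // 2
--         if lucas(mid) < number:
--             lo = mid + 1
--         else:
--             hi = mid
--     return lo + 1 if lucas(lo) == number else -1
--
--
-- def lucas(k):
--     a, b = fib_pair(k)
--     return 2 * b - a
--
--
-- def fib_pair(k):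
--     # (F(k), F(k+1)) by fast doubling
--     if k == 0:
--         return (0, 1)
--     a, b = fib_pair(k // 2)
--     c = a * (2 * b - a)
--     d = a * a + b * b
--     return (d, c + d) if k % 2 else (c, d)
-- ===== Notes on version B (the rewrite author's own statement) =====
-- stated objective: alternative
-- what changed: B never generates the sequence: it binary-searches the 1-based position over the strictly increasing tail (after the constant head 2,1), computing each Lucas value independently by Fibonacci fast doubling via L(k) = 2*F(k+1) - F(k), instead of A's build-the-whole-list, membership test and index scan.
import Mathlib
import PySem

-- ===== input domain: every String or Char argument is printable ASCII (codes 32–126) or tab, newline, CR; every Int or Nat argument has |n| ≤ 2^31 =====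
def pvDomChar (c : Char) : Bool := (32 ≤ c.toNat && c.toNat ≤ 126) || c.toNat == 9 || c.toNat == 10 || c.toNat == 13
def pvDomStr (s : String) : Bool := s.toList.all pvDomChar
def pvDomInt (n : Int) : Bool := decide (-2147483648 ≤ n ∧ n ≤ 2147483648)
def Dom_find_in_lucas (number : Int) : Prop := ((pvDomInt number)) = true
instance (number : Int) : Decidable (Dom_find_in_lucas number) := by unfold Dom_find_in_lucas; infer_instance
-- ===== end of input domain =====

-- B never generates the sequence: it binary-searches the position over the strictly increasing
-- tail, computing each Lucas value independently by Fibonacci fast doubling (alternative algorithm).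

-- ===== PORT A =====
-- A's while loop; fuel is a totality guard only (the loop stops when seq[-1] ≥ number;
-- fuel is chosen large enough that it never runs out before that — the lemmas prove it).
def lucasBuild (number : Int) (fuel : Nat) (seq : List Int) : List Int :=
  match fuel with
  | 0 => seq
  | fuel + 1 =>
    match PySem.List.pyGet? seq (-1), PySem.List.pyGet? seq (-2) with
    | some last, some prev =>
      if last < number then lucasBuild number fuel (seq ++ [last + prev]) else seq
    | _, _ => seq

def find_in_lucas (number : Int) : Int :=
  let seq := lucasBuild number (number.toNat + 2) [2, 1]
  match PySem.List.index? seq number with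
  | some i => (i : Int) + 1
  | none => -1

-- ===== PORT B =====
-- fib_pair(k) = (F(k), F(k+1)) by fast doubling; k ≥ 0 throughout in Source B, so Nat is exact.
-- The recursion is on k // 2 < k; fuel (= k) is a structural totality guard only.
def fibPairF : Nat → Nat → Int × Int
  | _, 0 => (0, 1)
  | 0, _ + 1 => (0, 1)  -- fuel exhausted: unreachable, k // 2 < k keeps k ≤ fuel (see fibPairF_eq)
  | f + 1, k + 1 =>
    let p := fibPairF f ((k + 1) / 2)
    let a := p.1
    let b := p.2
    let c := a * (2 * b - a)
    let d := a * a + b * b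
    if (k + 1) % 2 = 1 then (d, c + d) else (c, d)

def fibPair (k : Nat) : Int × Int := fibPairF k k

def lucasFD (k : Nat) : Int :=
  let p := fibPair k
  2 * p.2 - p.1

-- binary search for the least k in [lo, hi] with lucas(k) ≥ number (Source B's second while loop);
-- hi - lo shrinks every step, so fuel (= initial hi) is a structural totality guard only
def binPosF (number : Int) : Nat → Nat → Nat → Int
  | 0, lo, _ => if lucasFD lo = number then (lo : Int) + 1 else -1
  | f + 1, lo, hi =>
    if lo < hi then
      let mid := (lo + hi) / 2
      if lucasFD mid < number then binPosF number f (mid + 1) hi else binPosF number f lo mid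
    else
      if lucasFD lo = number then (lo : Int) + 1 else -1

def binPos (number : Int) (lo hi : Nat) : Int := binPosF number hi lo hi

-- Source B's first while loop (exponential search for hi); fuel is a totality guard only
def dblPos (number : Int) (fuel : Nat) (hi : Nat) : Int :=
  match fuel with
  | 0 => binPos number 2 hi
  | fuel + 1 =>
    if lucasFD hi < number then dblPos number fuel (hi * 2) else binPos number 2 hi

def find_in_lucas_alt (number : Int) : Int :=
  if number = 2 then 1
  else if number = 1 then 2
  else if number < 3 then -1
  else dblPos number (number.toNat + 2) 2

-- ===== PRECONDITION & SPEC =====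
def Spec_find_in_lucas (number : Int) (out : Int) : Prop := out = find_in_lucas_alt number
instance (number : Int) (out : Int) : Decidable (Spec_find_in_lucas number out) := by unfold Spec_find_in_lucas; infer_instance

-- ===== CLAIM (what is proved, stated in full; the proofs are below) =====
def Claim_equal_find_in_lucas : Prop := ∀ (number : Int), Dom_find_in_lucas number → Spec_find_in_lucas number (find_in_lucas number)

-- ===== LEMMAS AND PROOFS =====

-- the mathematical Lucas sequence, via Fibonacci
def Luc (k : Nat) : Int := 2 * (Nat.fib (k + 1) : Int) - Nat.fib k

theorem Luc_zero : Luc 0 = 2 := by decide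
theorem Luc_one : Luc 1 = 1 := by decide

theorem Luc_add_two (k : Nat) : Luc (k + 2) = Luc k + Luc (k + 1) := by
  unfold Luc
  have h1 := Nat.fib_add_two (n := k)
  have h2 := Nat.fib_add_two (n := k + 1)
  push_cast [h1, h2]
  ring

theorem Luc_pos : ∀ k, 1 ≤ Luc k ∧ 1 ≤ Luc (k + 1) := by
  intro k
  induction k with
  | zero => decide
  | succ k ih =>
    refine ⟨ih.2, ?_⟩
    rw [Luc_add_two]
    omega

theorem Luc_ge (k : Nat) : (k : Int) ≤ Luc k := by
  induction k using Nat.strong_induction_on with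
  | _ k ih =>
    match k with
    | 0 => decide
    | 1 => decide
    | k + 2 =>
      rw [Luc_add_two]
      have h1 := ih (k + 1) (by omega)
      have h2 := (Luc_pos k).1
      push_cast at h1 ⊢
      omega

theorem Luc_succ_lt (k : Nat) : Luc (k + 1) < Luc (k + 2) := by
  rw [Luc_add_two]
  have := (Luc_pos k).1
  omega

theorem Luc_lt_of_lt {j k : Nat} (hj : 1 ≤ j) (h : j < k) : Luc j < Luc k := by
  induction k with
  | zero => omega
  | succ k ih =>
    rcases Nat.lt_succ_iff_lt_or_eq.mp h with h' | h'
    · have hk : 1 ≤ k := by omega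
      have := Luc_succ_lt (k - 1)
      have hk' : k - 1 + 1 = k := by omega
      have hk'' : k - 1 + 2 = k + 1 := by omega
      rw [hk', hk''] at this
      exact lt_trans (ih h') this
    · subst h'
      have := Luc_succ_lt (j - 1)
      have h1 : j - 1 + 1 = j := by omega
      have h2 : j - 1 + 2 = j + 1 := by omega
      rw [h1, h2] at this
      exact this

theorem Luc_le_of_le {j k : Nat} (hj : 1 ≤ j) (h : j ≤ k) : Luc j ≤ Luc k := by
  rcases Nat.lt_or_ge j k with h' | h'
  · exact le_of_lt (Luc_lt_of_lt hj h')
  · have : j = k := by omega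
    subst this; exact le_refl _

-- fast doubling computes Fibonacci
theorem fibPairF_eq : ∀ (f k : Nat), k ≤ f → fibPairF f k = ((Nat.fib k : Int), (Nat.fib (k + 1) : Int)) := by
  intro f
  induction f with
  | zero =>
    intro k hk
    have : k = 0 := by omega
    subst this; decide
  | succ f ih =>
    intro k hk
    match k with
    | 0 => rfl
    | k + 1 =>
      rw [fibPairF, ih ((k + 1) / 2) (by omega)]
      have hle : Nat.fib ((k + 1) / 2) ≤ 2 * Nat.fib ((k + 1) / 2 + 1) := by
        have := Nat.fib_le_fib_succ (n := (k + 1) / 2); omega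
      rcases Nat.even_or_odd (k + 1) with ⟨m, hm⟩ | ⟨m, hm⟩
      · have hd : (k + 1) / 2 = m := by omega
        rw [hd] at hle ⊢
        rw [hm, show m + m = 2 * m from by omega] at *
        rw [if_neg (by omega : ¬ (2 * m % 2 = 1))]
        refine Prod.ext ?_ ?_ <;> dsimp only
        · rw [Nat.fib_two_mul, Nat.cast_mul, Nat.cast_sub (by omega)]; push_cast; ring
        · rw [Nat.fib_two_mul_add_one]; push_cast; ring
      · have hd : (k + 1) / 2 = m := by omega
        rw [hd] at hle ⊢
        rw [hm] at *
        rw [if_pos (by omega : (2 * m + 1) % 2 = 1)]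
        refine Prod.ext ?_ ?_ <;> dsimp only
        · rw [Nat.fib_two_mul_add_one]; push_cast; ring
        · rw [show 2 * m + 1 + 1 = 2 * m + 2 from rfl, Nat.fib_two_mul_add_two]; push_cast; ring

theorem fibPair_eq (k : Nat) : fibPair k = ((Nat.fib k : Int), (Nat.fib (k + 1) : Int)) :=
  fibPairF_eq k k (le_refl k)

theorem lucasFD_eq (k : Nat) : lucasFD k = Luc k := by
  unfold lucasFD Luc
  rw [fibPair_eq]

-- ===== A side: characterization via a streaming reference scan =====

-- reference scan (proof-side): keep the last two values and a position counter
def refScan (number : Int) (fuel : Nat) (a b pos : Int) : Int :=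
  match fuel with
  | 0 => if b = number then pos else -1
  | fuel + 1 =>
    if b < number then refScan number fuel b (a + b) (pos + 1)
    else if b = number then pos else -1

-- first occurrence of `n` in s ++ [a, b] when n is known to avoid s and a
theorem index?_tail_pair (s : List Int) (a b n : Int) :
    n ∉ s → n ≠ a →
    PySem.List.index? (s ++ [a, b]) n =
      if b = n then some (s.length + 1) else none := by
  induction s with
  | nil =>
    intro _ ha
    simp only [List.nil_append]
    by_cases hb : b = n
    · subst hb
      rw [PySem.List.index?_cons_of_ne _ (Ne.symm ha)]
      simp
    · rw [PySem.List.index?_cons_of_ne _ (Ne.symm ha),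
        PySem.List.index?_cons_of_ne _ hb]
      simp [hb]
  | cons x s ih =>
    intro hs ha
    have hx : n ≠ x := fun h => hs (h ▸ List.mem_cons_self)
    have hs' : n ∉ s := fun h => hs (List.mem_cons_of_mem _ h)
    rw [List.cons_append, PySem.List.index?_cons_of_ne _ (Ne.symm hx), ih hs' ha]
    by_cases hb : b = n <;> simp [hb, Nat.add_comm]

-- the result A extracts from the built list, as a function of the list
def idxResult (number : Int) (seq : List Int) : Int :=
  match PySem.List.index? seq number with
  | some i => (i : Int) + 1
  | none => -1

-- lockstep invariant: A's list is s ++ [a, b], the scan's counter is s.length + 2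
theorem build_scan (number : Int) (fuel : Nat) :
    ∀ (s : List Int) (a b : Int), 1 ≤ a → 1 ≤ b → number ∉ s → number ≠ a →
    idxResult number (lucasBuild number fuel (s ++ [a, b])) =
      refScan number fuel a b ((s.length : Int) + 2) := by
  induction fuel with
  | zero =>
    intro s a b _ _ hs ha
    simp only [lucasBuild, refScan, idxResult, index?_tail_pair s a b number hs ha]
    by_cases hb : b = number <;> simp [hb] <;> push_cast <;> ring
  | succ fuel ih =>
    intro s a b ha1 hb1 hs ha
    have hget1 : PySem.List.pyGet? (s ++ [a, b]) (-1) = some b := by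
      simp [PySem.List.pyGet?_neg_one, List.getLast?_append]
    have hget2 : PySem.List.pyGet? (s ++ [a, b]) (-2) = some a := by
      rw [PySem.List.pyGet?_neg_ofNat _ 2 (by omega) (by simp)]
      simp
    rw [lucasBuild, hget1, hget2, refScan]
    by_cases hlt : b < number
    · simp only [if_pos hlt]
      have : s ++ [a, b] ++ [b + a] = (s ++ [a]) ++ [b, a + b] := by
        simp [Int.add_comm]
      rw [this]
      have := ih (s ++ [a]) b (a + b) hb1 (by omega)
        (by simp; exact ⟨hs, ha⟩) (by omega)
      simpa [Int.add_comm, Int.add_assoc, Int.add_left_comm] using this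
    · simp only [if_neg hlt, idxResult, index?_tail_pair s a b number hs ha]
      by_cases hb : b = number <;> simp [hb] <;> push_cast <;> ring

-- ===== the common target: the least index with Luc ≥ number =====

theorem exists_Luc_ge (n : Int) : ∃ k, n ≤ Luc k :=
  ⟨n.toNat, le_trans (by omega) (Luc_ge n.toNat)⟩

def KK (n : Int) : Nat := Nat.find (exists_Luc_ge n)

theorem KK_ge (n : Int) : n ≤ Luc (KK n) := Nat.find_spec (exists_Luc_ge n)

theorem KK_le (n : Int) {j : Nat} (h : n ≤ Luc j) : KK n ≤ j :=
  Nat.find_le h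

theorem KK_le_toNat (n : Int) : KK n ≤ n.toNat :=
  KK_le n (le_trans (by omega) (Luc_ge n.toNat))

theorem KK_ge_two {n : Int} (hn : 3 ≤ n) : 2 ≤ KK n := by
  by_contra h
  interval_cases hK : KK n
  · have := KK_ge n; rw [hK] at this; rw [Luc_zero] at this; omega
  · have := KK_ge n; rw [hK] at this; rw [Luc_one] at this; omega

-- the scan computes the least index ≥ t+1 with Luc ≥ n, which is KK n when t+1 ≤ KK n
theorem refScan_eq (n : Int) :
    ∀ (fuel t : Nat), t + 1 ≤ KK n → KK n ≤ t + 1 + fuel →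
    refScan n fuel (Luc t) (Luc (t + 1)) ((t : Int) + 2) =
      (if Luc (KK n) = n then (KK n : Int) + 1 else -1) := by
  intro fuel
  induction fuel with
  | zero =>
    intro t h1 h2
    have ht : KK n = t + 1 := by omega
    rw [refScan, ht]
    have hge := KK_ge n
    rw [ht] at hge
    by_cases hb : Luc (t + 1) = n
    · simp [hb]; push_cast; ring
    · simp [hb]
  | succ fuel ih =>
    intro t h1 h2
    rw [refScan]
    by_cases hlt : Luc (t + 1) < n
    · have hKgt : t + 1 < KK n := by
        by_contra h
        have := KK_ge n
        have hle : Luc (KK n) ≤ Luc (t + 1) := by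
          rcases Nat.eq_or_lt_of_le (Nat.not_lt.mp h) with he | hl
          · rw [he]
          · have hK1 : 1 ≤ KK n := by omega
            exact le_of_lt (Luc_lt_of_lt hK1 hl)
        omega
      simp only [if_pos hlt]
      have hrec : Luc t + Luc (t + 1) = Luc (t + 2) := (Luc_add_two t).symm
      have := ih (t + 1) (by omega) (by omega)
      rw [hrec]
      have hc : ((t : Int) + 2 + 1) = ((t + 1 : Nat) : Int) + 2 := by push_cast; ring
      rw [hc]
      exact this
    · have hK : KK n = t + 1 := by
        have := KK_le n (by omega : n ≤ Luc (t + 1))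
        omega
      simp only [if_neg hlt]
      rw [hK]
      by_cases hb : Luc (t + 1) = n
      · simp [hb]; push_cast; ring
      · simp [hb]

-- binary search reaches KK n
theorem binPosF_eq (n : Int) (hn : 3 ≤ n) :
    ∀ (f lo hi : Nat), hi - lo ≤ f → 2 ≤ lo → lo ≤ hi →
    (∀ j, 2 ≤ j → j < lo → Luc j < n) → n ≤ Luc hi →
    binPosF n f lo hi = (if Luc (KK n) = n then (KK n : Int) + 1 else -1) := by
  have tail : ∀ (lo hi : Nat), 2 ≤ lo → lo = hi →
      (∀ j, 2 ≤ j → j < lo → Luc j < n) → n ≤ Luc hi →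
      (if lucasFD lo = n then (lo : Int) + 1 else -1) =
        (if Luc (KK n) = n then (KK n : Int) + 1 else -1) := by
    intro lo hi hlo2 he hbelow hhi
    rw [lucasFD_eq]
    have hK : KK n = lo := by
      have h1 : KK n ≤ lo := KK_le n (he ▸ hhi)
      by_contra hne
      have hlt : KK n < lo := by omega
      rcases Nat.lt_or_ge (KK n) 2 with h2 | h2
      · have := KK_ge_two hn; omega
      · have := hbelow (KK n) h2 hlt
        have := KK_ge n
        omega
    rw [hK]
  intro f
  induction f with
  | zero =>
    intro lo hi hd hlo2 hlohi hbelow hhi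
    rw [binPosF]
    exact tail lo hi hlo2 (by omega) hbelow hhi
  | succ f ih =>
    intro lo hi hd hlo2 hlohi hbelow hhi
    rw [binPosF]
    by_cases h : lo < hi
    · simp only [if_pos h]
      have hmid1 : lo ≤ (lo + hi) / 2 := by omega
      have hmid2 : (lo + hi) / 2 < hi := by omega
      simp only [lucasFD_eq]
      by_cases hc : Luc ((lo + hi) / 2) < n
      · simp only [if_pos hc]
        refine ih ((lo + hi) / 2 + 1) hi (by omega) (by omega) (by omega) ?_ hhi
        intro j hj2 hjlt
        rcases Nat.lt_or_ge j lo with hl | hl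
        · exact hbelow j hj2 hl
        · have : Luc j ≤ Luc ((lo + hi) / 2) :=
            Luc_le_of_le (by omega) (by omega)
          omega
      · simp only [if_neg hc]
        exact ih lo ((lo + hi) / 2) (by omega) hlo2 (by omega) hbelow (by omega)
    · simp only [if_neg h]
      exact tail lo hi hlo2 (by omega) hbelow hhi

theorem binPos_eq (n : Int) (hn : 3 ≤ n) (hi : Nat) (h2 : 2 ≤ hi) (hge : n ≤ Luc hi) :
    binPos n 2 hi = (if Luc (KK n) = n then (KK n : Int) + 1 else -1) :=
  binPosF_eq n hn hi 2 hi (by omega) (by omega) h2 (by omega) hge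

-- the doubling loop stops at some hi with Luc hi ≥ n and hands [2, hi] to the binary search
theorem dblPos_eq (n : Int) (hn : 3 ≤ n) :
    ∀ (fuel hi : Nat), 2 ≤ hi → n ≤ Luc (hi * 2 ^ fuel) →
    dblPos n fuel hi = (if Luc (KK n) = n then (KK n : Int) + 1 else -1) := by
  intro fuel
  induction fuel with
  | zero =>
    intro hi h2 hge
    rw [pow_zero, mul_one] at hge
    rw [dblPos]
    exact binPos_eq n hn hi h2 hge
  | succ fuel ih =>
    intro hi h2 hge
    rw [dblPos]
    simp only [lucasFD_eq]
    by_cases hc : Luc hi < n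
    · simp only [if_pos hc]
      refine ih (hi * 2) (by omega) ?_
      have : hi * 2 * 2 ^ fuel = hi * 2 ^ (fuel + 1) := by ring
      rw [this]
      exact hge
    · simp only [if_neg hc]
      exact binPos_eq n hn hi h2 (by omega)

-- ===== VERDICT (by name: the statement is the Claim_ definition above) =====
theorem find_in_lucas_spec : Claim_equal_find_in_lucas := by
  intro number _
  unfold Spec_find_in_lucas
  by_cases h2 : number = 2
  · subst h2; decide
  · by_cases h1 : number = 1
    · subst h1; decide
    · by_cases h3 : number < 3
      · -- number ≤ 0: A's loop never runs, the list stays [2, 1]; B returns -1 directly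
        have hn0 : number ≤ 0 := by omega
        have hA : find_in_lucas number = -1 := by
          unfold find_in_lucas
          change idxResult number (lucasBuild number (number.toNat + 2) [2, 1]) = -1
          have hfuel : number.toNat + 2 = 2 := by omega
          have hb : lucasBuild number 2 [2, 1] = [2, 1] := by
            rw [lucasBuild]
            simp only [show PySem.List.pyGet? ([2, 1] : List Int) (-1) = some 1 from rfl,
              show PySem.List.pyGet? ([2, 1] : List Int) (-2) = some 2 from rfl]
            rw [if_neg (by omega)]
          rw [hfuel, hb]
          unfold idxResult
          rw [PySem.List.index?_cons_of_ne _ (by omega : (2 : Int) ≠ number),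
            PySem.List.index?_cons_of_ne _ (by omega : (1 : Int) ≠ number)]
          simp [PySem.List.index?]
        have hB : find_in_lucas_alt number = -1 := by
          unfold find_in_lucas_alt
          rw [if_neg h2, if_neg h1, if_pos h3]
        rw [hA, hB]
      · -- number ≥ 3: both sides equal the KK-characterized result
        have hn : 3 ≤ number := by omega
        have hA : find_in_lucas number =
            (if Luc (KK number) = number then ((KK number : Nat) : Int) + 1 else -1) := by
          unfold find_in_lucas
          change idxResult number (lucasBuild number (number.toNat + 2) [2, 1]) = _
          have hstep := build_scan number (number.toNat + 2) [] 2 1 (by omega) (by omega)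
            (by simp) h2
          simp only [List.nil_append, List.length_nil, Nat.cast_zero, zero_add] at hstep
          have hK1 : 0 + 1 ≤ KK number := by have := KK_ge_two hn; omega
          have hK2 : KK number ≤ 0 + 1 + (number.toNat + 2) := by
            have := KK_le_toNat number; omega
          have hscan := refScan_eq number (number.toNat + 2) 0 hK1 hK2
          rw [Luc_zero, Luc_one] at hscan
          norm_num at hscan
          rw [hstep, hscan]
        have hB : find_in_lucas_alt number =
            (if Luc (KK number) = number then ((KK number : Nat) : Int) + 1 else -1) := by
          unfold find_in_lucas_alt
          rw [if_neg h2, if_neg h1, if_neg h3]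
          refine dblPos_eq number hn (number.toNat + 2) 2 (by omega) ?_
          have hg : (number.toNat : Int) ≤ Luc (2 * 2 ^ (number.toNat + 2)) := by
            calc (number.toNat : Int) ≤ (2 * 2 ^ (number.toNat + 2) : Nat) := by
                  have := Nat.lt_two_pow_self (n := number.toNat)
                  push_cast
                  have h2p : (number.toNat : Int) < 2 ^ number.toNat := by exact_mod_cast this
                  have hmono : (2 : Int) ^ number.toNat ≤ 2 ^ (number.toNat + 2) :=
                    pow_le_pow_right₀ (by norm_num) (by omega)
                  have hpos : (0 : Int) < 2 ^ (number.toNat + 2) := by positivity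
                  omega
              _ ≤ Luc (2 * 2 ^ (number.toNat + 2)) := Luc_ge _
          omega
        rw [hA, hB]
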